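-- pv_equiv track=rewrite | github.com/lucasvillatore/CDadosSeg | apk.py | getListOfRepeatedPermissions
-- ===== SOURCE A (Python) =====
-- def getListOfRepeatedPermissions(androidApks):
--     androidPermissions = {}
--     for androidApk in androidApks:
--         for apkPermission in androidApks[androidApk]:
--             try:
--                 if (androidApk not in androidPermissions[apkPermission]):
--                     androidPermissions[apkPermission].append(androidApk)
--             except:
--                 androidPermissions[apkPermission] = [androidApk]
--     return androidPermissions
-- ===== SOURCE B (Python) =====
-- def getListOfRepeatedPermissions(androidApks):
--     # Phase 1: all distinct permissions, in first-encounter order.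
--     order = dict.fromkeys(p for apk in androidApks for p in androidApks[apk])
--     # Phase 2: for each permission, scan the apks once and collect its owners.
--     return {p: [apk for apk in androidApks if p in androidApks[apk]] for p in order}
-- ===== Notes on version B (the rewrite author's own statement) =====
-- stated objective: alternative
-- what changed: Replaces A's single scatter pass (try/except dict of growing lists with a linear dedup membership test) by a two-phase index-then-scan: first collect the distinct permissions in first-encounter order, then build each permission's owner list by one membership scan over the apks.
import Mathlib
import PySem

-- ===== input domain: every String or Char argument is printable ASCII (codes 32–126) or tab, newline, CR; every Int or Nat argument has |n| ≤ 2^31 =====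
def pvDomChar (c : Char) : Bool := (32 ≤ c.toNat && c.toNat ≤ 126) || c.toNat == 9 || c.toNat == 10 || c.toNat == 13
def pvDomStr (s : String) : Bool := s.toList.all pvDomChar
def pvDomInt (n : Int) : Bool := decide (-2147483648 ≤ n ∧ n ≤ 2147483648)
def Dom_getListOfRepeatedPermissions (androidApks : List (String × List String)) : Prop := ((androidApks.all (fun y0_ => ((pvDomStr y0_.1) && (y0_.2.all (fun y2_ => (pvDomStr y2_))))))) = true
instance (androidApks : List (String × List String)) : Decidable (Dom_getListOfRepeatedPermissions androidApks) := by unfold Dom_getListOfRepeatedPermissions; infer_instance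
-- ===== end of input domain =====

-- B inverts the apk→permissions dict in two phases (distinct permissions first, then one
-- owner scan per permission) instead of A's single scatter pass; alternative decomposition, not faster.

-- ===== PORT A =====
-- first-match lookup in an association list (Python's d[k] on the dicts both programs use)
def pvLookup (d : List (String × List String)) (k : String) : Option (List String) :=
  match d with
  | [] => none
  | (k', v) :: rest => if k' = k then some v else pvLookup rest k

-- in-place replacement of the value at the first occurrence of key k (Python's list append mutates in place)
def pvSetFirst (d : List (String × List String)) (k : String) (nv : List String) : List (String × List String) :=
  match d with
  | [] => []
  | (k', v) :: rest => if k' = k then (k', nv) :: rest else (k', v) :: pvSetFirst rest k nv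

-- the try/except body of A for one permission p of apk k
def pvStep (k : String) (perms : List (String × List String)) (p : String) : List (String × List String) :=
  match pvLookup perms p with
  | some lst => if lst.contains k then perms else pvSetFirst perms p (lst ++ [k])
  | none => perms ++ [(p, [k])]

def getListOfRepeatedPermissions (androidApks : List (String × List String)) : List (String × List String) :=
  androidApks.foldl (fun perms kv =>
    ((pvLookup androidApks kv.1).getD []).foldl (pvStep kv.1) perms) []

-- ===== PORT B =====
def getListOfRepeatedPermissions_alt (androidApks : List (String × List String)) : List (String × List String) :=
  let order := PySem.List.dedup (androidApks.flatMap (fun kv => (pvLookup androidApks kv.1).getD []))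
  order.map (fun p =>
    (p, (androidApks.filter (fun kv => ((pvLookup androidApks kv.1).getD []).contains p)).map Prod.fst))

-- ===== PRECONDITION & SPEC =====
-- Pre_ excludes association lists with duplicate apk keys: A's parameter is a Python dict, which
-- cannot carry duplicate keys, so such lists represent no Python input and any behaviour on them
-- is an artefact of the assoc-list encoding.
def Pre_getListOfRepeatedPermissions (androidApks : List (String × List String)) : Prop :=
  (androidApks.map Prod.fst).Nodup

instance (androidApks : List (String × List String)) : Decidable (Pre_getListOfRepeatedPermissions androidApks) := by
  unfold Pre_getListOfRepeatedPermissions; infer_instance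

def pvWitness_getListOfRepeatedPermissions : (List (String × List String)) :=
  [("a.apk", ["net", "gps"]), ("b.apk", ["net"])]

def Spec_getListOfRepeatedPermissions (androidApks : List (String × List String)) (out : List (String × List String)) : Prop := out = getListOfRepeatedPermissions_alt androidApks
instance (androidApks : List (String × List String)) (out : List (String × List String)) : Decidable (Spec_getListOfRepeatedPermissions androidApks out) := by unfold Spec_getListOfRepeatedPermissions; infer_instance

-- ===== CLAIM (what is proved, stated in full; the proofs are below) =====
def Claim_equal_getListOfRepeatedPermissions : Prop := ∀ (androidApks : List (String × List String)), Dom_getListOfRepeatedPermissions androidApks → Pre_getListOfRepeatedPermissions androidApks → Spec_getListOfRepeatedPermissions androidApks (getListOfRepeatedPermissions androidApks)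

-- ===== LEMMAS AND PROOFS =====

-- proof-side: A's loop with each apk's permissions read from the pair itself
def pvFoldPairs (l : List (String × List String)) : List (String × List String) :=
  l.foldl (fun perms kv => kv.2.foldl (pvStep kv.1) perms) []

-- proof-side: the owner list B builds for permission p
def pvV (l : List (String × List String)) (p : String) : List String :=
  (l.filter (fun kv => kv.2.contains p)).map Prod.fst

-- proof-side: B's result with each apk's permissions read from the pair itself
def pvAssemble (l : List (String × List String)) : List (String × List String) :=
  (PySem.List.dedup (l.flatMap (fun kv => kv.2))).map (fun p => (p, pvV l p))

theorem pvLookup_map (S : List String) (g : String → List String) (p : String) :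
    pvLookup (S.map (fun x => (x, g x))) p = if p ∈ S then some (g p) else none := by
  induction S with
  | nil => simp [pvLookup]
  | cons a S ih =>
    by_cases h : a = p
    · subst h; simp [pvLookup]
    · simp [pvLookup, h, ih, Ne.symm h]

theorem pvSetFirst_map (S : List String) (g : String → List String) (p : String)
    (nv : List String) (hnd : S.Nodup) :
    pvSetFirst (S.map (fun x => (x, g x))) p nv
      = S.map (fun x => (x, if x = p then nv else g x)) := by
  induction S with
  | nil => simp [pvSetFirst]
  | cons a S ih =>
    rcases List.nodup_cons.mp hnd with ⟨ha, hS⟩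
    by_cases h : a = p
    · subst h
      simp only [List.map_cons, pvSetFirst, if_true]
      congr 1
      apply List.map_congr_left
      intro x hx
      have : x ≠ a := fun e => ha (e ▸ hx)
      simp [this]
    · simp [pvSetFirst, h, ih hS]

theorem pvLookup_key_nodup (l : List (String × List String))
    (h : (l.map Prod.fst).Nodup) (kv : String × List String) (hm : kv ∈ l) :
    pvLookup l kv.1 = some kv.2 := by
  induction l with
  | nil => cases hm
  | cons a l ih =>
    rcases List.nodup_cons.mp h with ⟨ha, hl⟩
    rcases List.mem_cons.mp hm with hm | hm
    · subst hm; simp [pvLookup]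
    · have hne : a.1 ≠ kv.1 := by
        intro e
        exact ha (e ▸ List.mem_map_of_mem hm)
      simpa [pvLookup, hne] using ih hl hm

theorem pvOwners_nil (l : List (String × List String)) (p : String)
    (h : p ∉ l.flatMap (fun kv => kv.2)) :
    l.filter (fun kv => kv.2.contains p) = [] := by
  rw [List.filter_eq_nil_iff]
  intro kv hkv
  simp only [List.contains_eq_mem, decide_eq_true_eq]
  intro hp
  exact h (List.mem_flatMap.mpr ⟨kv, hkv, hp⟩)

theorem pvMem_owner (l : List (String × List String)) (p y : String)
    (h : y ∈ pvV l p) : y ∈ l.map Prod.fst := by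
  rcases List.mem_map.mp h with ⟨kv, hkv, rfl⟩
  exact List.mem_map_of_mem (List.mem_of_mem_filter hkv)

theorem pvDedup_concat {α : Type} [BEq α] (xs : List α) (p : α) :
    PySem.List.dedup (xs ++ [p]) = PySem.Set.add (PySem.List.dedup xs) p := by
  simp [PySem.List.dedup_eq_ofList, PySem.Set.ofList_eq_foldl, List.foldl_append]

-- the inner loop of A over one fresh apk k, started from B's assembled table for l'
theorem pvInner (l' : List (String × List String)) (k : String)
    (hk : k ∉ l'.map Prod.fst) (ps : List String) :
    ps.foldl (pvStep k) (pvAssemble l')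
      = (PySem.List.dedup (l'.flatMap (fun kv => kv.2) ++ ps)).map (fun p =>
          (p, pvV l' p ++ if p ∈ ps then [k] else [])) := by
  induction ps using List.reverseRecOn with
  | nil => simp [pvAssemble]
  | append_singleton qs p ih =>
    rw [List.foldl_append, List.foldl_cons, List.foldl_nil, ih, ← List.append_assoc,
      pvDedup_concat]
    have hndS : (PySem.List.dedup (l'.flatMap (fun kv => kv.2) ++ qs)).Nodup :=
      PySem.List.nodup_dedup _
    have hkV : ∀ x, k ∉ pvV l' x := fun x hkx => hk (pvMem_owner l' x k hkx)
    by_cases hpS : p ∈ PySem.List.dedup (l'.flatMap (fun kv => kv.2) ++ qs)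
    · -- the permission already has a row in the table
      have hc : PySem.Set.contains (PySem.List.dedup (l'.flatMap (fun kv => kv.2) ++ qs)) p = true :=
        (PySem.Set.contains_iff _ _).mpr hpS
      have hadd : PySem.Set.add (PySem.List.dedup (l'.flatMap (fun kv => kv.2) ++ qs)) p
          = PySem.List.dedup (l'.flatMap (fun kv => kv.2) ++ qs) := by
        unfold PySem.Set.add; rw [hc, if_pos rfl]
      have hlk : pvLookup ((PySem.List.dedup (l'.flatMap (fun kv => kv.2) ++ qs)).map
            (fun x => (x, pvV l' x ++ if x ∈ qs then [k] else []))) p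
          = some (pvV l' p ++ if p ∈ qs then [k] else []) := by
        rw [pvLookup_map]; exact if_pos hpS
      rw [hadd]
      by_cases hpq : p ∈ qs
      · -- this apk was already recorded for p (duplicate permission in the apk)
        have hct : ((pvV l' p ++ if p ∈ qs then [k] else []).contains k) = true := by
          simp [hpq, List.contains_eq_mem]
        simp only [pvStep, hlk, hct, if_true]
        apply List.map_congr_left
        intro x hx
        by_cases hxp : x = p
        · subst hxp; simp [hpq]
        · simp [List.mem_append, hxp]
      · -- old permission, new apk: k is appended in place
        have hct : ((pvV l' p ++ if p ∈ qs then [k] else []).contains k) = false := by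
          simp [hpq, List.contains_eq_mem, hkV p]
        simp only [pvStep, hlk, hct, Bool.false_eq_true, if_false]
        rw [pvSetFirst_map _ _ _ _ hndS]
        apply List.map_congr_left
        intro x hx
        by_cases hxp : x = p
        · subst hxp; simp [hpq]
        · simp [hxp, List.mem_append]
    · -- brand-new permission: a fresh row (p, [k]) is appended
      have hc : PySem.Set.contains (PySem.List.dedup (l'.flatMap (fun kv => kv.2) ++ qs)) p = false :=
        Bool.eq_false_iff.mpr (fun hb => hpS ((PySem.Set.contains_iff _ _).mp hb))
      have hadd : PySem.Set.add (PySem.List.dedup (l'.flatMap (fun kv => kv.2) ++ qs)) p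
          = PySem.List.dedup (l'.flatMap (fun kv => kv.2) ++ qs) ++ [p] := by
        unfold PySem.Set.add; rw [hc, if_neg Bool.false_ne_true]
      have hpq : p ∉ qs := fun h =>
        hpS ((PySem.List.mem_dedup _ _).mpr (List.mem_append.mpr (Or.inr h)))
      have hpF : p ∉ l'.flatMap (fun kv => kv.2) := fun h =>
        hpS ((PySem.List.mem_dedup _ _).mpr (List.mem_append.mpr (Or.inl h)))
      have hlk : pvLookup ((PySem.List.dedup (l'.flatMap (fun kv => kv.2) ++ qs)).map
            (fun x => (x, pvV l' x ++ if x ∈ qs then [k] else []))) p = none := by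
        rw [pvLookup_map]; exact if_neg hpS
      simp only [pvStep, hlk]
      rw [hadd, List.map_append]
      congr 1
      · apply List.map_congr_left
        intro x hx
        have hxp : x ≠ p := fun e => hpS (e ▸ hx)
        simp [hxp, List.mem_append]
      · have hV0 : pvV l' p = [] := by
          rw [pvV, pvOwners_nil l' p hpF]; rfl
        simp [hV0]

-- A's pair-level loop computes B's assembled table
theorem pvFoldPairs_eq (l : List (String × List String))
    (h : (l.map Prod.fst).Nodup) : pvFoldPairs l = pvAssemble l := by
  induction l using List.reverseRecOn with
  | nil => simp [pvFoldPairs, pvAssemble, PySem.List.dedup, PySem.Set.ofList]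
  | append_singleton l' kv ih =>
    have h' : (l'.map Prod.fst).Nodup := by
      rw [List.map_append] at h
      exact (List.nodup_append.mp h).1
    have hk : kv.1 ∉ l'.map Prod.fst := by
      rw [List.map_append] at h
      intro hmem
      exact (List.nodup_append.mp h).2.2 kv.1 hmem kv.1 (by simp) rfl
    rw [pvFoldPairs, List.foldl_append, List.foldl_cons, List.foldl_nil]
    rw [show l'.foldl (fun perms kv => kv.2.foldl (pvStep kv.1) perms) [] = pvFoldPairs l' from rfl,
      ih h', pvInner l' kv.1 hk kv.2]
    rw [pvAssemble, List.flatMap_append]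
    simp only [List.flatMap_cons, List.flatMap_nil, List.append_nil]
    apply List.map_congr_left
    intro p hp
    simp only [Prod.mk.injEq, true_and]
    by_cases hpk : p ∈ kv.2
    · simp [pvV, hpk, List.filter_append, List.contains_eq_mem]
    · simp [pvV, hpk, List.filter_append, List.contains_eq_mem]

-- ===== VERDICT (by name: the statement is the Claim_ definition above) =====
theorem getListOfRepeatedPermissions_spec : Claim_equal_getListOfRepeatedPermissions := by
  intro apks _hdom hpre
  unfold Spec_getListOfRepeatedPermissions
  have hA : getListOfRepeatedPermissions apks = pvFoldPairs apks := by
    unfold getListOfRepeatedPermissions pvFoldPairs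
    apply PySem.List.foldl_congr_mem
    intro acc kv hkv
    rw [pvLookup_key_nodup apks hpre kv hkv]
    rfl
  have hB : getListOfRepeatedPermissions_alt apks = pvAssemble apks := by
    unfold getListOfRepeatedPermissions_alt pvAssemble
    have horder : apks.flatMap (fun kv => (pvLookup apks kv.1).getD [])
        = apks.flatMap (fun kv => kv.2) := by
      apply List.flatMap_congr
      intro kv hkv
      rw [pvLookup_key_nodup apks hpre kv hkv]
      rfl
    rw [horder]
    apply List.map_congr_left
    intro p hp
    rw [pvV]
    congr 2
    apply List.filter_congr
    intro kv hkv
    rw [pvLookup_key_nodup apks hpre kv hkv]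
    rfl
  rw [hA, hB, pvFoldPairs_eq apks hpre]
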